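-- pv_equiv track=rewrite | github.com/alextra-lab/personal_agent | src/personal_agent/tools/primitives/bash.py | _split_command_segments
-- ===== SOURCE A (Python) =====
-- def _split_command_segments(command: str) -> list[str]:
--     """Split a shell command into pipeline / sequence segments.
--
--     Splits on top-level ``|``, ``||``, ``&&``, and ``;`` while respecting
--     single-quoted strings, double-quoted strings, and backslash escapes.
--     Sub-shells (``$(…)`` or backticks) are treated as opaque and are NOT
--     recursively split — their content is included in the surrounding segment.
--
--     Args:
--         command: Raw shell command string.
--
--     Returns:
--         Non-empty, stripped segment strings.  An empty command returns ``[]``.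
--     """
--     segments: list[str] = []
--     current: list[str] = []
--     in_single = False
--     in_double = False
--     i = 0
--     n = len(command)
--
--     while i < n:
--         c = command[i]
--
--         if in_single:
--             current.append(c)
--             if c == "'":
--                 in_single = False
--             i += 1
--         elif in_double:
--             if c == "\\" and i + 1 < n:
--                 # Backslash escapes are two characters inside double quotes.
--                 current.append(c)
--                 i += 1
--                 current.append(command[i])
--                 i += 1
--             else:
--                 current.append(c)
--                 if c == '"':
--                     in_double = False
--                 i += 1
--         elif c == "\\" and i + 1 < n:
--             current.append(c)
--             i += 1
--             current.append(command[i])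
--             i += 1
--         elif c == "'":
--             in_single = True
--             current.append(c)
--             i += 1
--         elif c == '"':
--             in_double = True
--             current.append(c)
--             i += 1
--         elif c == ";":
--             segments.append("".join(current).strip())
--             current = []
--             i += 1
--         elif c == "|":
--             if i + 1 < n and command[i + 1] == "|":
--                 segments.append("".join(current).strip())
--                 current = []
--                 i += 2
--             else:
--                 segments.append("".join(current).strip())
--                 current = []
--                 i += 1
--         elif c == "&":
--             if i + 1 < n and command[i + 1] == "&":
--                 segments.append("".join(current).strip())
--                 current = []
--                 i += 2
--             else:
--                 # Single ``&`` (background execution) — treat as part of segment.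
--                 current.append(c)
--                 i += 1
--         else:
--             current.append(c)
--             i += 1
--
--     remaining = "".join(current).strip()
--     if remaining:
--         segments.append(remaining)
--
--     return [s for s in segments if s]
-- ===== SOURCE B (Python) =====
-- def _split_command_segments(command: str) -> list[str]:
--     """Two-phase re-implementation: tokenize (quoted runs consumed in bulk,
--     operators emitted as None markers), then group tokens into segments."""
--
--     def eat_double(s, i):
--         # consume a double-quoted run starting at the opening quote s[i]
--         parts = [s[i]]
--         i += 1
--         n = len(s)
--         while i < n:
--             c = s[i]
--             if c == "\\" and i + 1 < n:
--                 parts.append(s[i:i + 2])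
--                 i += 2
--             else:
--                 parts.append(c)
--                 i += 1
--                 if c == '"':
--                     break
--         return "".join(parts), i
--
--     def tokenize(s):
--         toks = []  # str = text chunk, None = split operator
--         i, n = 0, len(s)
--         while i < n:
--             c = s[i]
--             if c == "'":
--                 j = s.find("'", i + 1)
--                 if j == -1:
--                     toks.append(s[i:])
--                     i = n
--                 else:
--                     toks.append(s[i:j + 1])
--                     i = j + 1
--             elif c == '"':
--                 piece, i = eat_double(s, i)
--                 toks.append(piece)
--             elif c == "\\" and i + 1 < n:
--                 toks.append(s[i:i + 2])
--                 i += 2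
--             elif c == ";" or c == "|":
--                 toks.append(None)
--                 i += 2 if s[i:i + 2] == "||" else 1
--             elif s[i:i + 2] == "&&":
--                 toks.append(None)
--                 i += 2
--             else:
--                 toks.append(c)
--                 i += 1
--         return toks
--
--     segments = []
--     buf = []
--     for t in tokenize(command):
--         if t is None:
--             segments.append("".join(buf).strip())
--             buf = []
--         else:
--             buf.append(t)
--     segments.append("".join(buf).strip())
--     return [seg for seg in segments if seg]
-- ===== Notes on version B (the rewrite author's own statement) =====
-- stated objective: alternative
-- what changed: Replaces A's single char-by-char state machine (in_single/in_double booleans with inline segment flushes) by a two-phase pipeline: a tokenizer that consumes quoted runs in bulk (str.find for single quotes, a dedicated double-quote scanner) and emits operator markers, followed by a separate grouping pass that joins text tokens into segments.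
import Mathlib
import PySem

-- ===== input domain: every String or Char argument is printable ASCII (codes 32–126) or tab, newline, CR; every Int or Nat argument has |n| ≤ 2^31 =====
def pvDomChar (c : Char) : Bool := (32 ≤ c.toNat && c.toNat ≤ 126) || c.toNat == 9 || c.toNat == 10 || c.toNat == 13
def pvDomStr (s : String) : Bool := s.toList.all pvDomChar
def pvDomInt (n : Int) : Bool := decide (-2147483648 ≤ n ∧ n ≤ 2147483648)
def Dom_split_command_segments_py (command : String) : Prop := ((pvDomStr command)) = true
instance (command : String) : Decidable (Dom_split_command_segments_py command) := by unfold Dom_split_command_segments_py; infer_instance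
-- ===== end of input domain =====

-- B replaces A's single char-by-char state machine (mode booleans, inline segment flushes)
-- by a two-phase tokenizer (quoted runs consumed in bulk, operators emitted as markers) plus
-- a grouping pass; objective: alternative decomposition, same cost, return value only.

-- ===== PORT A =====
-- A's while loop: state = (remaining chars, in_single, in_double, current, segments).
def splitLoopA : List Char → Bool → Bool → List Char → List String → List String
  | [], _, _, cur, segs =>
      let remaining := PySem.Str.strip (String.ofList cur)
      (segs ++ (if remaining ≠ "" then [remaining] else [])).filter (fun s => !(s == ""))
  | c :: rest, true, inD, cur, segs =>
      splitLoopA rest (!(c == '\'')) inD (cur ++ [c]) segs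
  | c :: rest, false, true, cur, segs =>
      if c == '\\' then
        match hr : rest with
        | d :: rest' => splitLoopA rest' false true (cur ++ ['\\', d]) segs
        | [] => splitLoopA [] false (!(c == '"')) (cur ++ [c]) segs
      else
        splitLoopA rest false (!(c == '"')) (cur ++ [c]) segs
  | c :: rest, false, false, cur, segs =>
      if c == '\\' then
        match hr : rest with
        | d :: rest' => splitLoopA rest' false false (cur ++ ['\\', d]) segs
        | [] => splitLoopA [] false false (cur ++ [c]) segs
      else if c == '\'' then splitLoopA rest true false (cur ++ ['\'']) segs
      else if c == '"' then splitLoopA rest false true (cur ++ ['"']) segs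
      else if c == ';' then splitLoopA rest false false [] (segs ++ [PySem.Str.strip (String.ofList cur)])
      else if c == '|' then
        match hr : rest with
        | '|' :: rest' => splitLoopA rest' false false [] (segs ++ [PySem.Str.strip (String.ofList cur)])
        | _ => splitLoopA rest false false [] (segs ++ [PySem.Str.strip (String.ofList cur)])
      else if c == '&' then
        match hr : rest with
        | '&' :: rest' => splitLoopA rest' false false [] (segs ++ [PySem.Str.strip (String.ofList cur)])
        | _ => splitLoopA rest false false (cur ++ [c]) segs
      else splitLoopA rest false false (cur ++ [c]) segs
  termination_by cs _ _ _ _ => cs.length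
  decreasing_by all_goals (simp_all; try omega)

def split_command_segments_py (command : String) : List String :=
  splitLoopA command.toList false false [] []

-- ===== PORT B =====
-- Source B's s.find("'", i+1) + slice = split at the first quote (takeWhile/dropWhile).
def eatSingleB (cs : List Char) : List Char × List Char :=
  let pre := cs.takeWhile (fun c => !(c == '\''))
  match cs.dropWhile (fun c => !(c == '\'')) with
  | [] => (pre, [])
  | q :: r => (pre ++ [q], r)

theorem eatSingleB_snd_length (cs : List Char) : (eatSingleB cs).2.length ≤ cs.length := by
  unfold eatSingleB
  cases h : cs.dropWhile (fun c => !(c == '\'')) with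
  | nil => simp
  | cons q r =>
      have := (List.dropWhile_sublist (l := cs) (p := fun c => !(c == '\''))).length_le
      rw [h] at this
      simpa using Nat.le_of_succ_le (by simpa using this)

-- Source B's eat_double inner loop, after the opening quote.
def eatDoubleB : List Char → List Char × List Char
  | [] => ([], [])
  | '\\' :: d :: rest =>
      let (p, r) := eatDoubleB rest
      ('\\' :: d :: p, r)
  | c :: rest =>
      if c == '"' then ([c], rest)
      else
        let (p, r) := eatDoubleB rest
        (c :: p, r)

theorem eatDoubleB_snd_length (cs : List Char) : (eatDoubleB cs).2.length ≤ cs.length := by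
  fun_induction eatDoubleB cs <;> simp_all [eatDoubleB] <;> omega

-- token: some s = text chunk, none = split operator (Python's None marker).
def tokenizeB : List Char → List (Option String)
  | [] => []
  | '\'' :: rest =>
      some (String.ofList ('\'' :: (eatSingleB rest).1)) :: tokenizeB (eatSingleB rest).2
  | '"' :: rest =>
      some (String.ofList ('"' :: (eatDoubleB rest).1)) :: tokenizeB (eatDoubleB rest).2
  | '\\' :: d :: rest => some (String.ofList ['\\', d]) :: tokenizeB rest
  | ';' :: rest => none :: tokenizeB rest
  | '|' :: '|' :: rest => none :: tokenizeB rest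
  | '|' :: rest => none :: tokenizeB rest
  | '&' :: '&' :: rest => none :: tokenizeB rest
  | c :: rest => some (String.ofList [c]) :: tokenizeB rest
  termination_by cs => cs.length
  decreasing_by all_goals
    (have h1 := eatSingleB_snd_length rest
     have h2 := eatDoubleB_snd_length rest
     simp_all
     try omega)

def groupB : List (Option String) → List String → List String
  | [], buf => [PySem.Str.strip (String.join buf)]
  | none :: ts, _buf => PySem.Str.strip (String.join _buf) :: groupB ts []
  | some s :: ts, buf => groupB ts (buf ++ [s])

def split_command_segments_py_alt (command : String) : List String :=
  (groupB (tokenizeB command.toList) []).filter (fun s => !(s == ""))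

-- ===== PRECONDITION & SPEC =====
def Spec_split_command_segments_py (command : String) (out : List String) : Prop := out = split_command_segments_py_alt command
instance (command : String) (out : List String) : Decidable (Spec_split_command_segments_py command out) := by unfold Spec_split_command_segments_py; infer_instance

-- ===== CLAIM (what is proved, stated in full; the proofs are below) =====
def Claim_equal_split_command_segments_py : Prop := ∀ (command : String), Dom_split_command_segments_py command → Spec_split_command_segments_py command (split_command_segments_py command)

-- ===== LEMMAS AND PROOFS =====
theorem joinAppend (buf : List String) (s : String) : String.join (buf ++ [s]) = String.join buf ++ s := by
  simp [String.join_eq, String.ofList_append, String.ofList_toList]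

theorem eatSingleB_cons_ne (c : Char) (rest : List Char) (h : (c == '\'') = false) :
    eatSingleB (c :: rest) = (c :: (eatSingleB rest).1, (eatSingleB rest).2) := by
  simp only [eatSingleB, List.takeWhile_cons, List.dropWhile_cons, h]
  cases hd : rest.dropWhile (fun c => !(c == '\'')) <;> simp [hd]

theorem splitLoopA_single (cs : List Char) : ∀ (inD : Bool) (cur : List Char) (segs : List String),
    splitLoopA cs true inD cur segs
      = splitLoopA (eatSingleB cs).2 false inD (cur ++ (eatSingleB cs).1) segs := by
  induction cs with
  | nil => intro inD cur segs; simp [splitLoopA, eatSingleB]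
  | cons c rest ih =>
      intro inD cur segs
      by_cases hc : c = '\''
      · subst hc; simp [splitLoopA, eatSingleB]
      · have hb : (c == '\'') = false := by simp [hc]
        rw [eatSingleB_cons_ne c rest hb]
        simp only [splitLoopA, hb, Bool.not_false]
        rw [ih]
        simp

theorem splitLoopA_double (cs : List Char) : ∀ (cur : List Char) (segs : List String),
    splitLoopA cs false true cur segs
      = splitLoopA (eatDoubleB cs).2 false false (cur ++ (eatDoubleB cs).1) segs := by
  fun_induction eatDoubleB cs with
  | case1 => intro cur segs; simp [splitLoopA, eatDoubleB]
  | case2 d rest p r hpr ih =>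
      intro cur segs
      simp only [splitLoopA]
      rw [ih]
      simp [eatDoubleB, hpr]
  | case3 x1 x2 x3 x4 =>
      intro cur segs
      have hx : x1 = '"' := by simpa using x4
      subst hx
      conv_lhs => rw [splitLoopA.eq_def]
      simp [eatDoubleB]
  | case4 c rest hne hc p r hpr ih =>
      intro cur segs
      by_cases hbs : c = '\\'
      · subst hbs
        cases rest with
        | nil =>
            have hp : p = [] := by simpa using congrArg Prod.fst hpr.symm
            have hr2 : r = [] := by simpa using congrArg Prod.snd hpr.symm
            subst hp; subst hr2
            conv_lhs => rw [splitLoopA.eq_def]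
            simp [splitLoopA, eatDoubleB]
        | cons d r2 => exact (hne d r2 rfl rfl).elim
      · have hb : (c == '\\') = false := by simp [hbs]
        have hc' : (c == '"') = false := by simpa using hc
        conv_lhs => rw [splitLoopA.eq_def]
        simp only [hb, hc', Bool.false_eq_true, if_false, Bool.not_false]
        rw [ih]
        simp [hpr]

theorem splitLoopA_main (cs : List Char) : ∀ (cur : List Char) (segs buf : List String),
    String.join buf = String.ofList cur →
    splitLoopA cs false false cur segs
      = (segs ++ groupB (tokenizeB cs) buf).filter (fun s => !(s == "")) := by
  fun_induction tokenizeB cs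
  · -- case1: []
    intro cur segs buf hbuf
    by_cases h : PySem.Str.strip (String.ofList cur) = "" <;>
      simp [splitLoopA, groupB, hbuf, h, List.filter_append]
  · -- case2: single quote
    rename_i rest ih
    intro cur segs buf hbuf
    have hb2 : String.join (buf ++ [String.ofList ('\'' :: (eatSingleB rest).1)])
        = String.ofList ((cur ++ ['\'']) ++ (eatSingleB rest).1) := by
      rw [joinAppend, hbuf, ← String.ofList_append]
      congr 1
      simp
    conv_lhs => rw [splitLoopA.eq_def]
    simp only [List.cons.injEq, reduceCtorEq, Char.reduceEq, Bool.false_eq_true, if_false,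
      beq_self_eq_true, if_true, reduceIte]
    rw [splitLoopA_single, ih _ _ _ hb2]
    simp [groupB]
  · -- case3: double quote
    rename_i rest ih
    intro cur segs buf hbuf
    have hb2 : String.join (buf ++ [String.ofList ('"' :: (eatDoubleB rest).1)])
        = String.ofList ((cur ++ ['"']) ++ (eatDoubleB rest).1) := by
      rw [joinAppend, hbuf, ← String.ofList_append]
      congr 1
      simp
    conv_lhs => rw [splitLoopA.eq_def]
    simp only [reduceCtorEq, Char.reduceEq, Bool.false_eq_true, if_false, beq_self_eq_true,
      if_true, reduceIte]
    rw [splitLoopA_double, ih _ _ _ hb2]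
    simp [groupB]
  · -- case4: backslash + char
    rename_i d rest ih
    intro cur segs buf hbuf
    have hb2 : String.join (buf ++ [String.ofList ['\\', d]])
        = String.ofList ((cur ++ ['\\', d])) := by
      rw [joinAppend, hbuf, ← String.ofList_append]
    conv_lhs => rw [splitLoopA.eq_def]
    simp only [beq_self_eq_true, if_true, reduceIte]
    rw [ih _ _ _ hb2]
    simp [groupB]
  · -- case5: ';'
    rename_i rest ih
    intro cur segs buf hbuf
    conv_lhs => rw [splitLoopA.eq_def]
    simp only [Char.reduceEq, Bool.false_eq_true, if_false, beq_self_eq_true, if_true, reduceIte]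
    rw [ih [] _ [] (by decide)]
    simp [groupB, hbuf, List.append_assoc]
  · -- case6: '||'
    rename_i rest ih
    intro cur segs buf hbuf
    conv_lhs => rw [splitLoopA.eq_def]
    simp only [Char.reduceEq, Bool.false_eq_true, if_false, beq_self_eq_true, if_true, reduceIte]
    rw [ih [] _ [] (by decide)]
    simp [groupB, hbuf, List.append_assoc]
  · -- case7: single '|'
    rename_i rest hne ih
    intro cur segs buf hbuf
    conv_lhs => rw [splitLoopA.eq_def]
    simp only [Char.reduceEq, Bool.false_eq_true, if_false, beq_self_eq_true, if_true, reduceIte]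
    cases rest with
    | nil =>
        rw [ih [] _ [] (by decide)]
        simp [groupB, hbuf, List.append_assoc]
    | cons d r2 =>
        have hd : (d == '|') = false := by
          by_cases h : d = '|'
          · exact ((hne r2 (by rw [h])).elim)
          · simp [h]
        simp only [hd]
        rw [ih [] _ [] (by decide)]
        simp [groupB, hbuf, List.append_assoc, hd]
  · -- case8: '&&'
    rename_i rest ih
    intro cur segs buf hbuf
    conv_lhs => rw [splitLoopA.eq_def]
    simp only [Char.reduceEq, Bool.false_eq_true, if_false, beq_self_eq_true, if_true, reduceIte]
    rw [ih [] _ [] (by decide)]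
    simp [groupB, hbuf, List.append_assoc]
  · -- case9: ordinary character
    rename_i c rest hq hdq hbsq hsemi hpp hp hamp ih
    intro cur segs buf hbuf
    have hb2 : String.join (buf ++ [String.ofList [c]]) = String.ofList (cur ++ [c]) := by
      rw [joinAppend, hbuf, ← String.ofList_append]
    by_cases hbs : c = '\\'
    · subst hbs
      have hrest : rest = [] := by
        cases rest with
        | nil => rfl
        | cons d r2 => exact ((hbsq d r2 rfl rfl).elim)
      subst hrest
      conv_lhs => rw [splitLoopA.eq_def]
      simp only [beq_self_eq_true, if_true, reduceIte]
      rw [ih _ _ _ hb2]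
      simp [groupB]
    · have h1 : (c == '\\') = false := by simp [hbs]
      have h2 : (c == '\'') = false := by simpa using hq
      have h3 : (c == '"') = false := by simpa using hdq
      have h4 : (c == ';') = false := by simpa using hsemi
      have h5 : (c == '|') = false := by simpa using hp
      by_cases hampc : c = '&'
      · subst hampc
        conv_lhs => rw [splitLoopA.eq_def]
        simp only [Char.reduceEq, Bool.false_eq_true, if_false, beq_self_eq_true, if_true,
          reduceIte]
        cases rest with
        | nil =>
            rw [ih _ _ _ hb2]
            simp [groupB]
        | cons d r2 =>
            have hd : (d == '&') = false := by
              by_cases h : d = '&'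
              · exact ((hamp r2 rfl (by rw [h])).elim)
              · simp [h]
            rw [ih _ _ _ hb2]
            simp [groupB, hd]
            split
            · rename_i rest' heq
              simp_all
            · rfl
      · have h6 : (c == '&') = false := by simp [hampc]
        conv_lhs => rw [splitLoopA.eq_def]
        simp only [h1, h2, h3, h4, h5, h6, Bool.false_eq_true, if_false]
        rw [ih _ _ _ hb2]
        simp [groupB]


-- ===== VERDICT (by name: the statement is the Claim_ definition above) =====
theorem split_command_segments_py_spec : Claim_equal_split_command_segments_py := by
  intro command _
  unfold Spec_split_command_segments_py split_command_segments_py split_command_segments_py_alt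
  rw [splitLoopA_main command.toList [] [] [] (by decide)]
  simp
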